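-- pv_equiv track=rewrite | github.com/keanay/Game_2048 | game2048.py | left_rearranger
-- ===== SOURCE A (Python) =====
-- EMPTYCELL='<>'
--
-- CELLSANDROWSNUM=4
--
-- def left_rearranger(board):
-- 	addtwo=False
-- 	for cell in range(CELLSANDROWSNUM):
-- 		for row in range(CELLSANDROWSNUM):
-- 			if board[row][cell]==EMPTYCELL:
-- 				for nxtcell in range(1,(CELLSANDROWSNUM-cell)):
-- 					if board[row][cell+nxtcell]!=EMPTYCELL:
-- 						board[row][cell]=board[row][cell+nxtcell]
-- 						board[row][cell+nxtcell]=EMPTYCELL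
-- 						addtwo=True
-- 						break
-- 	return addtwo
-- ===== SOURCE B (Python) =====
-- EMPTYCELL = '<>'
--
-- CELLSANDROWSNUM = 4
--
-- def left_rearranger(board):
--     moved = False
--     for r in range(CELLSANDROWSNUM):
--         row = board[r]
--         old = [row[c] for c in range(CELLSANDROWSNUM)]
--         filled = [v for v in old if v != EMPTYCELL]
--         new_row = filled + [EMPTYCELL] * (CELLSANDROWSNUM - len(filled))
--         if new_row != old:
--             moved = True
--         row[:CELLSANDROWSNUM] = new_row
--     return moved
-- ===== Notes on version B (the rewrite author's own statement) =====
-- stated objective: simpler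
-- what changed: A's cell-major nested scan with an inner right-search and element swaps is replaced by a per-row rebuild: filter the non-empty cells of each row, pad with EMPTYCELL, compare with the old row to set the flag, and slice-assign it back.
import Mathlib
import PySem

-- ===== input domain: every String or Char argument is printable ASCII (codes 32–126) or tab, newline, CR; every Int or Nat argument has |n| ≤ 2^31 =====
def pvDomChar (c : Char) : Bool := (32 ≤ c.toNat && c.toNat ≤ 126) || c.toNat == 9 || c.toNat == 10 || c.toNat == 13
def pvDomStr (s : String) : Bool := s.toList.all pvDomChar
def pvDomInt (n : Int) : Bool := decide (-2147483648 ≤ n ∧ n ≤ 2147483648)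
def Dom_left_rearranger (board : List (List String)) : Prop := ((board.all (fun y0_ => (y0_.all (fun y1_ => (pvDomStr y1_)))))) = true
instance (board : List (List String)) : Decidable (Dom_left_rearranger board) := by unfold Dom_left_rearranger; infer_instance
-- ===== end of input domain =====

-- B rebuilds each row as (non-empty cells ++ padding) and compares it with the old row,
-- replacing A's cell-major nested scan with an inner right-search; equivalence is about the
-- RETURN value only (both Pythons also mutate `board` in place, identically on all tests).


-- ===== PORT A =====
-- board[row][cell]; indices produced by A are in range under Pre_, so getD defaults are never hit there
def pvGetCell (b : List (List String)) (row cell : Nat) : String :=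
  (b.getD row []).getD cell ""

def pvSetCell (b : List (List String)) (row cell : Nat) (v : String) : List (List String) :=
  b.set row ((b.getD row []).set cell v)

-- the inner `for nxtcell in range(1, 4-cell): … break` loop
def pvInnerA : List Nat → List (List String) → Nat → Nat → Bool → List (List String) × Bool
  | [], b, _, _, a => (b, a)
  | n :: ns, b, row, cell, a =>
      if pvGetCell b row (cell + n) != "<>" then
        (pvSetCell (pvSetCell b row cell (pvGetCell b row (cell + n))) row (cell + n) "<>", true)
      else pvInnerA ns b row cell a

-- one (cell,row) iteration of A's two outer loops
def pvStepA (st : List (List String) × Bool) (cell row : Nat) : List (List String) × Bool :=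
  if pvGetCell st.1 row cell == "<>" then
    pvInnerA (List.range' 1 (3 - cell)) st.1 row cell st.2
  else st

def left_rearranger (board : List (List String)) : Bool :=
  ((List.range 4).foldl (fun st cell =>
      (List.range 4).foldl (fun st row => pvStepA st cell row) st) (board, false)).2

-- ===== PORT B =====
-- per-row rebuild: the row's non-empty cells in order, padded with EMPTYCELL to length 4
def pvNewRow (old : List String) : List String :=
  let filled := old.filter (fun v => v != "<>")
  filled ++ List.replicate (4 - filled.length) "<>"

def left_rearranger_alt (board : List (List String)) : Bool :=
  (List.range 4).foldl (fun moved r =>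
    let row := board.getD r []
    let old := (List.range 4).map (fun c => row.getD c "")
    moved || (pvNewRow old != old)) false

-- ===== PRECONDITION & SPEC =====
-- A indexes board[0..3][0..3]; it raises IndexError iff the board has fewer than 4 rows
-- or one of the first 4 rows has fewer than 4 cells.
def Pre_left_rearranger (board : List (List String)) : Prop :=
  4 ≤ board.length ∧ ∀ r ∈ board.take 4, 4 ≤ r.length
instance (board : List (List String)) : Decidable (Pre_left_rearranger board) := by
  unfold Pre_left_rearranger; infer_instance

def pvWitness_left_rearranger : List (List String) :=
  [["2", "<>", "2", "<>"], ["<>", "<>", "<>", "<>"], ["4", "4", "8", "2"], ["<>", "2", "<>", "<>"]]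

def Spec_left_rearranger (board : List (List String)) (out : Bool) : Prop := out = left_rearranger_alt board
instance (board : List (List String)) (out : Bool) : Decidable (Spec_left_rearranger board out) := by unfold Spec_left_rearranger; infer_instance

-- ===== CLAIM (what is proved, stated in full; the proofs are below) =====
def Claim_equal_left_rearranger : Prop := ∀ (board : List (List String)), Dom_left_rearranger board → Pre_left_rearranger board → Spec_left_rearranger board (left_rearranger board)

-- ===== LEMMAS AND PROOFS =====

-- A move fires at (cell,row) iff that cell is empty and some cell to its right (within the window) is not
def pvFires (b : List (List String)) (cell row : Nat) : Bool :=
  (pvGetCell b row cell == "<>") &&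
    ((List.range' 1 (3 - cell)).any (fun n => pvGetCell b row (cell + n) != "<>"))

-- A's 16 iterations as one flat list of (cell,row) pairs, in A's order
def pvSteps : List (Nat × Nat) :=
  (List.range 4).flatMap (fun c => (List.range 4).map (fun r => (c, r)))

-- row (a,b,c,d) is not left-compacted: some empty cell has a non-empty cell to its right
def pvBad (a b c d : String) : Bool :=
  (a == "<>" && (b != "<>" || c != "<>" || d != "<>")) ||
  (b == "<>" && (c != "<>" || d != "<>")) ||
  (c == "<>" && d != "<>")

lemma pvInnerA_no_fire (ns : List Nat) (b : List (List String)) (row cell : Nat) (a : Bool)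
    (h : ∀ n ∈ ns, pvGetCell b row (cell + n) = "<>") :
    pvInnerA ns b row cell a = (b, a) := by
  induction ns with
  | nil => rfl
  | cons n ns ih =>
      simp only [pvInnerA]
      rw [h n (by simp)]
      simp [ih (fun m hm => h m (by simp [hm]))]

lemma pvInnerA_fire (ns : List Nat) (b : List (List String)) (row cell : Nat) (a : Bool)
    (h : ∃ n ∈ ns, pvGetCell b row (cell + n) ≠ "<>") :
    (pvInnerA ns b row cell a).2 = true := by
  induction ns with
  | nil => simp at h
  | cons n ns ih =>
      simp only [pvInnerA]
      by_cases hn : pvGetCell b row (cell + n) = "<>"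
      · simp only [hn, bne_self_eq_false, Bool.false_eq_true, if_false]
        apply ih
        rcases h with ⟨m, hm, hne⟩
        rcases List.mem_cons.1 hm with h1 | h1
        · exact absurd (h1 ▸ hn) hne
        · exact ⟨m, h1, hne⟩
      · simp [hn]

lemma pvInnerA_true (ns : List Nat) (b : List (List String)) (row cell : Nat) :
    (pvInnerA ns b row cell true).2 = true := by
  induction ns with
  | nil => rfl
  | cons n ns ih =>
      simp only [pvInnerA]
      split <;> simp [ih]

lemma pvStepA_no_fire (st : List (List String) × Bool) (cell row : Nat)
    (h : pvFires st.1 cell row = false) : pvStepA st cell row = st := by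
  unfold pvStepA
  unfold pvFires at h
  by_cases hc : pvGetCell st.1 row cell = "<>"
  · simp only [hc, beq_self_eq_true, if_true]
    rw [pvInnerA_no_fire]
    intro n hn
    simp only [hc, beq_self_eq_true, Bool.true_and, List.any_eq_false] at h
    have := h n hn
    simpa using this
  · simp [hc]

lemma pvStepA_fire (st : List (List String) × Bool) (cell row : Nat)
    (h : pvFires st.1 cell row = true) : (pvStepA st cell row).2 = true := by
  unfold pvStepA
  unfold pvFires at h
  simp only [Bool.and_eq_true, beq_iff_eq, List.any_eq_true] at h
  obtain ⟨hc, n, hn, hne⟩ := h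
  simp only [hc, beq_self_eq_true, if_true]
  exact pvInnerA_fire _ _ _ _ _ ⟨n, hn, by simpa using hne⟩

lemma pvStepA_true (st : List (List String) × Bool) (cell row : Nat)
    (h : st.2 = true) : (pvStepA st cell row).2 = true := by
  unfold pvStepA
  split
  · rw [h]; exact pvInnerA_true _ _ _ _
  · exact h

lemma pvFoldA_true (steps : List (Nat × Nat)) (st : List (List String) × Bool)
    (h : st.2 = true) :
    (steps.foldl (fun st p => pvStepA st p.1 p.2) st).2 = true := by
  induction steps generalizing st with
  | nil => exact h
  | cons p ps ih => exact ih _ (pvStepA_true _ _ _ h)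

lemma pvFoldA_no_fire (steps : List (Nat × Nat)) (b : List (List String))
    (h : ∀ p ∈ steps, pvFires b p.1 p.2 = false) :
    steps.foldl (fun st p => pvStepA st p.1 p.2) (b, false) = (b, false) := by
  induction steps with
  | nil => rfl
  | cons p ps ih =>
      simp only [List.foldl_cons]
      rw [pvStepA_no_fire (b, false) p.1 p.2 (h p (by simp))]
      exact ih (fun q hq => h q (by simp [hq]))

lemma pvFoldA_fire (steps : List (Nat × Nat)) (b : List (List String))
    (h : ∃ p ∈ steps, pvFires b p.1 p.2 = true) :
    (steps.foldl (fun st p => pvStepA st p.1 p.2) (b, false)).2 = true := by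
  induction steps with
  | nil => simp at h
  | cons p ps ih =>
      simp only [List.foldl_cons]
      by_cases hp : pvFires b p.1 p.2 = true
      · exact pvFoldA_true _ _ (pvStepA_fire _ _ _ hp)
      · rw [pvStepA_no_fire (b, false) p.1 p.2 (by simpa using hp)]
        apply ih
        rcases h with ⟨q, hq, hf⟩
        rcases List.mem_cons.1 hq with h1 | h1
        · exact absurd (h1 ▸ hf) hp
        · exact ⟨q, h1, hf⟩

-- A's nested fold is the flat fold over pvSteps (same 16 iterations in the same order)
lemma pvFoldA_eq (board : List (List String)) :
    left_rearranger board
      = (pvSteps.foldl (fun st p => pvStepA st p.1 p.2) (board, false)).2 := by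
  have hr : List.range 4 = [0, 1, 2, 3] := by decide
  have hs : pvSteps = [(0,0),(0,1),(0,2),(0,3),(1,0),(1,1),(1,2),(1,3),
      (2,0),(2,1),(2,2),(2,3),(3,0),(3,1),(3,2),(3,3)] := by decide
  simp only [left_rearranger, hr, hs, List.foldl_cons, List.foldl_nil]

-- the four fires of one row, OR-ed, equal pvBad of that row's four cells
lemma pvFires_row (b : List (List String)) (row : Nat) :
    (pvFires b 0 row || pvFires b 1 row || pvFires b 2 row || pvFires b 3 row)
      = pvBad (pvGetCell b row 0) (pvGetCell b row 1) (pvGetCell b row 2) (pvGetCell b row 3) := by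
  have r3 : List.range' 1 (3 - 0) = [1, 2, 3] := rfl
  have r2 : List.range' 1 (3 - 1) = [1, 2] := rfl
  have r1 : List.range' 1 (3 - 2) = [1] := rfl
  have r0 : List.range' 1 (3 - 3) = [] := rfl
  simp only [pvFires, pvBad, r3, r2, r1, r0, List.any_cons, List.any_nil, bne]
  norm_num
  generalize (pvGetCell b row 0 == "<>") = g0
  generalize (pvGetCell b row 1 == "<>") = g1
  generalize (pvGetCell b row 2 == "<>") = g2
  generalize (pvGetCell b row 3 == "<>") = g3
  revert g0 g1 g2 g3
  decide

-- B's changed-test on a row's four cells is pvBad of them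
lemma pvNewRow_bad (a b c d : String) :
    (pvNewRow [a, b, c, d] != [a, b, c, d]) = pvBad a b c d := by
  cases hA : a == "<>" <;> cases hB : b == "<>" <;> cases hC : c == "<>" <;> cases hD : d == "<>" <;>
    simp [pvNewRow, pvBad, List.replicate, bne, hA, hB, hC, hD, Bool.beq_comm]

lemma pvSteps_mem (c r : Nat) (hc : c < 4) (hr : r < 4) : (c, r) ∈ pvSteps := by
  simp only [pvSteps, List.mem_flatMap, List.mem_map, List.mem_range]
  exact ⟨c, hc, r, hr, rfl⟩

lemma pvSteps_mem_lt (p : Nat × Nat) (hp : p ∈ pvSteps) : p.1 < 4 ∧ p.2 < 4 := by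
  simp only [pvSteps, List.mem_flatMap, List.mem_map, List.mem_range] at hp
  obtain ⟨c, hc, r, hr, rfl⟩ := hp
  exact ⟨hc, hr⟩

lemma pvRow_fire (b : List (List String)) (row : Nat) (hr : row < 4)
    (h : (pvFires b 0 row || pvFires b 1 row || pvFires b 2 row || pvFires b 3 row) = true) :
    (pvSteps.foldl (fun st p => pvStepA st p.1 p.2) (b, false)).2 = true := by
  apply pvFoldA_fire
  rcases Bool.or_eq_true_iff.1 h with h | h3
  rcases Bool.or_eq_true_iff.1 h with h | h2
  rcases Bool.or_eq_true_iff.1 h with h0 | h1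
  · exact ⟨(0, row), pvSteps_mem 0 row (by omega) hr, h0⟩
  · exact ⟨(1, row), pvSteps_mem 1 row (by omega) hr, h1⟩
  · exact ⟨(2, row), pvSteps_mem 2 row (by omega) hr, h2⟩
  · exact ⟨(3, row), pvSteps_mem 3 row (by omega) hr, h3⟩

lemma pvFour_destruct {α : Type} (l : List α) (h : 4 ≤ l.length) :
    ∃ a b c d t, l = a :: b :: c :: d :: t := by
  match l with
  | a :: b :: c :: d :: t => exact ⟨a, b, c, d, t, rfl⟩
  | [] => simp at h
  | [_] => simp at h
  | [_, _] => simp at h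
  | [_, _, _] => simp at h

-- ===== VERDICT (by name: the statement is the Claim_ definition above) =====
theorem left_rearranger_spec : Claim_equal_left_rearranger := by
  intro board _ hpre
  obtain ⟨hlen, hrows⟩ := hpre
  obtain ⟨r0, r1, r2, r3, rest, rfl⟩ := pvFour_destruct board hlen
  obtain ⟨a0, b0, c0, d0, t0, rfl⟩ := pvFour_destruct r0 (hrows _ (by simp [List.take]))
  obtain ⟨a1, b1, c1, d1, t1, rfl⟩ := pvFour_destruct r1 (hrows _ (by simp [List.take]))
  obtain ⟨a2, b2, c2, d2, t2, rfl⟩ := pvFour_destruct r2 (hrows _ (by simp [List.take]))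
  obtain ⟨a3, b3, c3, d3, t3, rfl⟩ := pvFour_destruct r3 (hrows _ (by simp [List.take]))
  set bd : List (List String) :=
    (a0 :: b0 :: c0 :: d0 :: t0) :: (a1 :: b1 :: c1 :: d1 :: t1) ::
    (a2 :: b2 :: c2 :: d2 :: t2) :: (a3 :: b3 :: c3 :: d3 :: t3) :: rest with hbd
  have w0 : (pvFires bd 0 0 || pvFires bd 1 0 || pvFires bd 2 0 || pvFires bd 3 0)
      = pvBad a0 b0 c0 d0 := by
    have := pvFires_row bd 0; simpa [hbd, pvGetCell, List.getD] using this
  have w1 : (pvFires bd 0 1 || pvFires bd 1 1 || pvFires bd 2 1 || pvFires bd 3 1)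
      = pvBad a1 b1 c1 d1 := by
    have := pvFires_row bd 1; simpa [hbd, pvGetCell, List.getD] using this
  have w2 : (pvFires bd 0 2 || pvFires bd 1 2 || pvFires bd 2 2 || pvFires bd 3 2)
      = pvBad a2 b2 c2 d2 := by
    have := pvFires_row bd 2; simpa [hbd, pvGetCell, List.getD] using this
  have w3 : (pvFires bd 0 3 || pvFires bd 1 3 || pvFires bd 2 3 || pvFires bd 3 3)
      = pvBad a3 b3 c3 d3 := by
    have := pvFires_row bd 3; simpa [hbd, pvGetCell, List.getD] using this
  have hB : left_rearranger_alt bd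
      = (pvBad a0 b0 c0 d0 || pvBad a1 b1 c1 d1 || pvBad a2 b2 c2 d2 || pvBad a3 b3 c3 d3) := by
    have hr : List.range 4 = [0, 1, 2, 3] := by decide
    simp only [hbd, left_rearranger_alt, hr, List.foldl_cons, List.foldl_nil, List.map_cons,
      List.map_nil, List.getD, Bool.false_or]
    norm_num [List.getD]
    rw [pvNewRow_bad, pvNewRow_bad, pvNewRow_bad, pvNewRow_bad]
  show left_rearranger bd = left_rearranger_alt bd
  rw [pvFoldA_eq, hB]
  by_cases H : (pvBad a0 b0 c0 d0 || pvBad a1 b1 c1 d1 || pvBad a2 b2 c2 d2 || pvBad a3 b3 c3 d3) = true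
  · rw [H]
    rcases Bool.or_eq_true_iff.1 H with h | hb3
    rcases Bool.or_eq_true_iff.1 h with h | hb2
    rcases Bool.or_eq_true_iff.1 h with hb0 | hb1
    · exact pvRow_fire bd 0 (by omega) (w0.trans hb0)
    · exact pvRow_fire bd 1 (by omega) (w1.trans hb1)
    · exact pvRow_fire bd 2 (by omega) (w2.trans hb2)
    · exact pvRow_fire bd 3 (by omega) (w3.trans hb3)
  · have H' := Bool.eq_false_iff.2 (fun hx => H hx)
    simp only [Bool.or_eq_false_iff] at H'
    obtain ⟨⟨⟨H0, H1⟩, H2⟩, H3⟩ := H'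
    rw [H0] at w0; rw [H1] at w1; rw [H2] at w2; rw [H3] at w3
    simp only [Bool.or_eq_false_iff] at w0 w1 w2 w3
    have hall : ∀ p ∈ pvSteps, pvFires bd p.1 p.2 = false := by
      intro p hp
      obtain ⟨hc, hr⟩ := pvSteps_mem_lt p hp
      obtain ⟨c, r⟩ := p
      simp only at hc hr
      interval_cases r <;> interval_cases c <;> tauto
    rw [pvFoldA_no_fire pvSteps bd hall]
    simp [H0, H1, H2, H3]
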